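-- pv_equiv track=rewrite | github.com/gutenbergtools/ebookconverter | ebookconverter/writers/SummaryWriter.py | remove_gutenberg_wrapper
-- ===== SOURCE A (Python) =====
-- def remove_gutenberg_wrapper(text):
--     """Remove Gutenberg header and footer from book text."""
--     lines = text.split('\n')
--     start_index = 0
--     end_index = len(lines)
--
--     for i, line in enumerate(lines):
--         if line.startswith("*** START OF"):
--             start_index = i + 1
--         elif line.startswith("*** END OF"):
--             end_index = i
--             break
--
--     return '\n'.join(lines[start_index:end_index]).strip()
-- ===== SOURCE B (Python) =====
-- def remove_gutenberg_wrapper(text):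
--     """Remove Gutenberg header and footer from book text."""
--     kept = []
--     seen_start = False
--     for line in reversed(text.split('\n')):
--         if line.startswith("*** START OF"):
--             seen_start = True
--         elif line.startswith("*** END OF"):
--             kept = []
--             seen_start = False
--         elif not seen_start:
--             kept.append(line)
--     kept.reverse()
--     return '\n'.join(kept).strip()
-- ===== Notes on version B (the rewrite author's own statement) =====
-- stated objective: alternative
-- what changed: A scans forward keeping start/end indices and slices the line list; B makes a single backward pass over the lines with a reset-on-END / freeze-on-START accumulator that builds the kept lines directly, with no indices and no slicing.
import Mathlib
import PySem

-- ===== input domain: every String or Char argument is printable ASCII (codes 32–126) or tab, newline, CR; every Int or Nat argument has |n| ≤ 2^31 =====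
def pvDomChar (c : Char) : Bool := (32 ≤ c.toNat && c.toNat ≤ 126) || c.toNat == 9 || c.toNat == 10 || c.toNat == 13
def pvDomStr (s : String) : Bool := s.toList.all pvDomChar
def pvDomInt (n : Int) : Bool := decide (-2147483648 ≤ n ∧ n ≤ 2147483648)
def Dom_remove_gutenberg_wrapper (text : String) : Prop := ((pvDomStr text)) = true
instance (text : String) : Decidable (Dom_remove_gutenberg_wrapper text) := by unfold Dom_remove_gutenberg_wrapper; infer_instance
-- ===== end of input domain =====

-- B replaces A's forward index scan + slice by one backward pass that builds the kept
-- lines directly (reset on an END marker, freeze on a START marker); objective: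
-- alternative decomposition, same cost.

-- ===== PORT A =====
-- A's for-loop with break, as structural recursion over the lines with the running
-- (i, start_index) state; end_index is returned at the break or kept at len(lines).
def remove_gutenberg_wrapper.loop (ls : List String) (i start_index end_index : Int) : Int × Int :=
  match ls with
  | [] => (start_index, end_index)
  | line :: rest =>
    if PySem.Str.startswith line "*** START OF" then
      remove_gutenberg_wrapper.loop rest (i + 1) (i + 1) end_index
    else if PySem.Str.startswith line "*** END OF" then
      (start_index, i)
    else
      remove_gutenberg_wrapper.loop rest (i + 1) start_index end_index

def remove_gutenberg_wrapper (text : String) : String :=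
  let lines := (PySem.Str.split? text "\n").getD []
  let p := remove_gutenberg_wrapper.loop lines 0 0 (lines.length : Int)
  PySem.Str.strip (PySem.Str.join "\n" (PySem.List.slice lines (some p.1) (some p.2)))

-- ===== PORT B =====
-- One Python loop iteration over the reversed lines: (kept, seen_start) state.
def remove_gutenberg_wrapper_alt.step (st : List String × Bool) (line : String) : List String × Bool :=
  if PySem.Str.startswith line "*** START OF" then
    (st.1, true)
  else if PySem.Str.startswith line "*** END OF" then
    ([], false)
  else if !st.2 then
    (st.1 ++ [line], st.2)
  else
    st

def remove_gutenberg_wrapper_alt (text : String) : String :=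
  let lines := (PySem.Str.split? text "\n").getD []
  let st := lines.reverse.foldl remove_gutenberg_wrapper_alt.step ([], false)
  PySem.Str.strip (PySem.Str.join "\n" st.1.reverse)

-- ===== PRECONDITION & SPEC =====
def Spec_remove_gutenberg_wrapper (text : String) (out : String) : Prop := out = remove_gutenberg_wrapper_alt text
instance (text : String) (out : String) : Decidable (Spec_remove_gutenberg_wrapper text out) := by unfold Spec_remove_gutenberg_wrapper; infer_instance

-- ===== CLAIM =====
def Claim_equal_remove_gutenberg_wrapper : Prop := ∀ (text : String), Dom_remove_gutenberg_wrapper text → Spec_remove_gutenberg_wrapper text (remove_gutenberg_wrapper text)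

-- ===== LEMMAS AND PROOFS =====

-- index of the first "*** END OF" line, if any
def pvFE : List String → Option Nat
  | [] => none
  | l :: rest => if PySem.Str.startswith l "*** END OF" then some 0 else (pvFE rest).map (· + 1)

-- one more than the index of the last "*** START OF" line, threading A's accumulator
def pvLS (ls : List String) (i s0 : Int) : Int :=
  match ls with
  | [] => s0
  | l :: rest => pvLS rest (i + 1) (if PySem.Str.startswith l "*** START OF" then i + 1 else s0)

-- index of the last "*** START OF" line, if any
def pvLSI : List String → Option Nat
  | [] => none
  | l :: rest =>
    match pvLSI rest with
    | some k => some (k + 1)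
    | none => if PySem.Str.startswith l "*** START OF" then some 0 else none

-- whether a "*** START OF" line occurs before the first "*** END OF" line
def pvSw : List String → Bool
  | [] => false
  | l :: rest =>
    if PySem.Str.startswith l "*** START OF" then true
    else if PySem.Str.startswith l "*** END OF" then false
    else pvSw rest

-- the semantic segment: lines strictly between the last START before the first END, and that END
def pvH : List String → List String
  | [] => []
  | l :: rest =>
    if PySem.Str.startswith l "*** START OF" then pvH rest
    else if PySem.Str.startswith l "*** END OF" then []
    else if pvSw rest then pvH rest else l :: pvH rest

-- a line starting with "*** START OF" does not start with "*** END OF"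
theorem pv_disj (l : String) (h : PySem.Str.startswith l "*** START OF" = true) :
    PySem.Str.startswith l "*** END OF" = false := by
  by_contra hc
  rw [Bool.not_eq_false] at hc
  rw [PySem.Str.startswith_eq, PySem.Chars.startswith_iff] at h hc
  rcases List.prefix_or_prefix_of_prefix h hc with h' | h' <;> revert h' <;> decide

theorem pv_loopA_char (ls : List String) (i s0 e0 : Int) :
    remove_gutenberg_wrapper.loop ls i s0 e0 =
      (pvLS (ls.takeWhile (fun l => !PySem.Str.startswith l "*** END OF")) i s0,
       match pvFE ls with
       | none => e0
       | some k => i + (k : Int)) := by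
  induction ls generalizing i s0 with
  | nil => rfl
  | cons l rest ih =>
    by_cases hs : PySem.Str.startswith l "*** START OF" = true
    · have he := pv_disj l hs
      simp only [remove_gutenberg_wrapper.loop, pvFE, pvLS, List.takeWhile_cons, hs, he,
        Bool.not_false, Bool.false_eq_true, if_true, if_false]
      rw [ih]
      cases hfe : pvFE rest with
      | none => simp only [Option.map_none]
      | some k =>
        simp only [Option.map_some, Prod.mk.injEq, true_and]
        push_cast
        ring
    · by_cases he : PySem.Str.startswith l "*** END OF" = true
      · simp only [remove_gutenberg_wrapper.loop, pvFE, pvLS, List.takeWhile_cons, hs, he,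
          Bool.not_true, Bool.false_eq_true, if_true, if_false]
        norm_num
      · rw [Bool.not_eq_true] at he
        simp only [remove_gutenberg_wrapper.loop, pvFE, pvLS, List.takeWhile_cons, hs, he,
          Bool.not_false, Bool.false_eq_true, if_true, if_false]
        rw [ih]
        cases hfe : pvFE rest with
        | none => simp only [Option.map_none]
        | some k =>
          simp only [Option.map_some, Prod.mk.injEq, true_and]
          push_cast
          ring

theorem pv_take_char (ls : List String) :
    ls.take (match pvFE ls with | none => ls.length | some k => k) =
      ls.takeWhile (fun l => !PySem.Str.startswith l "*** END OF") := by
  induction ls with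
  | nil => rfl
  | cons l rest ih =>
    by_cases he : PySem.Str.startswith l "*** END OF" = true
    · simp only [pvFE, List.takeWhile_cons, he, Bool.not_true, Bool.false_eq_true, if_true, if_false, List.take_zero]
    · rw [Bool.not_eq_true] at he
      simp only [pvFE, List.takeWhile_cons, he, Bool.not_false, Bool.false_eq_true, if_true,
        if_false]
      cases hfe : pvFE rest with
      | none =>
        rw [hfe] at ih
        simp only [Option.map_none, List.length_cons, List.take_succ_cons, ih]
      | some k =>
        rw [hfe] at ih
        simp only [Option.map_some, List.take_succ_cons, ih]

-- pvLS in terms of the last-START index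
theorem pv_ls_char (ls : List String) (i s0 : Int) :
    pvLS ls i s0 = match pvLSI ls with | none => s0 | some k => i + (k : Int) + 1 := by
  induction ls generalizing i s0 with
  | nil => rfl
  | cons l rest ih =>
    simp only [pvLS, pvLSI, ih]
    cases hk : pvLSI rest with
    | none => cases hs : PySem.Str.startswith l "*** START OF" <;> simp
    | some k =>
      simp only []
      push_cast
      ring

-- pvSw on an END-free list is "some START occurs"
theorem pv_sw_char (ls : List String)
    (hE : ∀ l ∈ ls, PySem.Str.startswith l "*** END OF" = false) :
    pvSw ls = (pvLSI ls).isSome := by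
  induction ls with
  | nil => rfl
  | cons l rest ih =>
    have hl := hE l (List.mem_cons_self)
    have ih' := ih (fun x hx => hE x (List.mem_cons_of_mem l hx))
    simp only [pvSw, pvLSI, hl, Bool.false_eq_true, if_false]
    cases hk : pvLSI rest with
    | none =>
      rw [hk] at ih'
      cases PySem.Str.startswith l "*** START OF" <;> simp [ih']
    | some k =>
      rw [hk] at ih'
      simp [ih']

-- pvH on an END-free list drops through the last START
theorem pv_h_endfree (ls : List String)
    (hE : ∀ l ∈ ls, PySem.Str.startswith l "*** END OF" = false) :
    pvH ls = match pvLSI ls with | none => ls | some k => ls.drop (k + 1) := by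
  induction ls with
  | nil => rfl
  | cons l rest ih =>
    have hl := hE l (List.mem_cons_self)
    have hE' : ∀ x ∈ rest, PySem.Str.startswith x "*** END OF" = false :=
      fun x hx => hE x (List.mem_cons_of_mem l hx)
    have ih' := ih hE'
    simp only [pvH, pvLSI, hl, Bool.false_eq_true, if_false]
    by_cases hs : PySem.Str.startswith l "*** START OF" = true
    · simp only [hs, if_true]
      cases hk : pvLSI rest with
      | none =>
        rw [hk] at ih'
        simpa using ih'
      | some k =>
        rw [hk] at ih'
        simpa using ih'
    · rw [Bool.not_eq_true] at hs
      rw [pv_sw_char rest hE']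
      simp only [hs, Bool.false_eq_true, if_false]
      cases hk : pvLSI rest with
      | none =>
        rw [hk] at ih'
        simpa using ih'
      | some k =>
        rw [hk] at ih'
        simpa using ih'

-- pvSw only looks at the END-free prefix
theorem pv_sw_prefix (ls : List String) :
    pvSw ls = pvSw (ls.takeWhile (fun l => !PySem.Str.startswith l "*** END OF")) := by
  induction ls with
  | nil => rfl
  | cons l rest ih =>
    by_cases he : PySem.Str.startswith l "*** END OF" = true
    · have hs : PySem.Str.startswith l "*** START OF" = false := by
        by_contra hc
        rw [Bool.not_eq_false] at hc
        rw [pv_disj l hc] at he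
        exact Bool.false_ne_true he
      simp at hs he
      simp [pvSw, hs, he]
    · rw [Bool.not_eq_true] at he
      by_cases hs : PySem.Str.startswith l "*** START OF" = true
      · simp at hs he
        simp [pvSw, hs, he]
      · rw [Bool.not_eq_true] at hs
        simp at hs he
        simp [pvSw, hs, he, ih]

-- pvH only looks at the END-free prefix
theorem pv_h_prefix (ls : List String) :
    pvH ls = pvH (ls.takeWhile (fun l => !PySem.Str.startswith l "*** END OF")) := by
  induction ls with
  | nil => rfl
  | cons l rest ih =>
    by_cases he : PySem.Str.startswith l "*** END OF" = true
    · have hs : PySem.Str.startswith l "*** START OF" = false := by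
        by_contra hc
        rw [Bool.not_eq_false] at hc
        rw [pv_disj l hc] at he
        exact Bool.false_ne_true he
      simp at hs he
      simp [pvH, hs, he]
    · rw [Bool.not_eq_true] at he
      by_cases hs : PySem.Str.startswith l "*** START OF" = true
      · simp at hs he
        simp [pvH, hs, he, ih]
      · rw [Bool.not_eq_true] at hs
        simp only [pvH, List.takeWhile_cons, hs, he, Bool.not_false, Bool.false_eq_true,
          if_true, if_false, ih, ← pv_sw_prefix]

-- B's backward fold computes (pvH, pvSw) (segment stored reversed)
theorem pv_fold_char (ls : List String) :
    ls.reverse.foldl remove_gutenberg_wrapper_alt.step ([], false) = ((pvH ls).reverse, pvSw ls) := by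
  induction ls with
  | nil => rfl
  | cons l rest ih =>
    rw [List.reverse_cons, List.foldl_append, ih]
    by_cases hs : PySem.Str.startswith l "*** START OF" = true
    · simp at hs
      simp [remove_gutenberg_wrapper_alt.step, pvH, pvSw, hs]
    · rw [Bool.not_eq_true] at hs
      by_cases he : PySem.Str.startswith l "*** END OF" = true
      · simp at hs he
        simp [remove_gutenberg_wrapper_alt.step, pvH, pvSw, hs, he]
      · rw [Bool.not_eq_true] at he
        simp at hs he
        cases hw : pvSw rest
        · simp [remove_gutenberg_wrapper_alt.step, pvH, pvSw, hs, he, hw]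
        · simp [remove_gutenberg_wrapper_alt.step, pvH, pvSw, hs, he, hw]

-- A's slice equals pvH
theorem pv_a_segment (lines : List String) :
    PySem.List.slice lines
      (some (remove_gutenberg_wrapper.loop lines 0 0 (lines.length : Int)).1)
      (some (remove_gutenberg_wrapper.loop lines 0 0 (lines.length : Int)).2) = pvH lines := by
  rw [pv_loopA_char]
  dsimp only
  set prefixL := lines.takeWhile (fun l => !PySem.Str.startswith l "*** END OF") with hpre
  have hE : ∀ l ∈ prefixL, PySem.Str.startswith l "*** END OF" = false := by
    intro l hl
    have := List.mem_takeWhile_imp hl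
    simpa using this
  have hs0 : pvLS prefixL 0 0 =
      match pvLSI prefixL with | none => (0 : Int) | some k => (k : Int) + 1 := by
    rw [pv_ls_char]
    cases pvLSI prefixL <;> simp
  have hnn : 0 ≤ pvLS prefixL 0 0 := by
    rw [hs0]; cases pvLSI prefixL <;> (simp; try positivity)
  have henn : 0 ≤ (match pvFE lines with | none => (lines.length : Int) | some k => 0 + (k : Int)) := by
    cases pvFE lines <;> simp
  rw [PySem.List.slice_toNat (ha := hnn) (hb := henn)]
  have htake : lines.take ((match pvFE lines with
      | none => (lines.length : Int) | some k => 0 + (k : Int)).toNat) = prefixL := by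
    rw [hpre, ← pv_take_char]
    cases pvFE lines <;> simp
  rw [← List.drop_take, htake, pv_h_prefix lines, ← hpre, pv_h_endfree prefixL hE, hs0]
  cases hk : pvLSI prefixL with
  | none => simp
  | some k => simp

-- ===== VERDICT =====
theorem remove_gutenberg_wrapper_spec : Claim_equal_remove_gutenberg_wrapper := by
  intro text _
  unfold Spec_remove_gutenberg_wrapper remove_gutenberg_wrapper remove_gutenberg_wrapper_alt
  generalize ((PySem.Str.split? text "\n").getD []) = lines
  dsimp only
  rw [pv_fold_char, pv_a_segment]
  simp
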